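-- pv_equiv track=rewrite | github.com/dlist7/advent-of-code-2022-python | day22a.py | update_north
-- ===== SOURCE A (Python) =====
-- def update_north(monkey_map, r0, c0, r, c):
--     if r > 0:
--         if monkey_map[r-1][c] == '.':
--             return (r-1,c)
--         elif monkey_map[r-1][c] == '#':
--             return (r0,c0)
--         else:
--             return update_north(monkey_map, r0, c0, r-1, c)
--     else:
--         if monkey_map[len(monkey_map)-1][c] == '.':
--             return (len(monkey_map)-1,c)
--         elif monkey_map[len(monkey_map)-1][c] == '#':
--             return (r0,c0)
--         else:
--             return update_north(monkey_map, r0, c0, len(monkey_map)-1, c)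
-- ===== SOURCE B (Python) =====
-- def update_north(monkey_map, r0, c0, r, c):
--     n = len(monkey_map)
--     s = r - 1 if r > 0 else n - 1
--     for j in range(n):
--         nr = (s - j) % n
--         ch = monkey_map[nr][c]
--         if ch == '.':
--             return (nr, c)
--         if ch == '#':
--             return (r0, c0)
--     return (r0, c0)
-- ===== Notes on version B (the rewrite author's own statement) =====
-- stated objective: alternative
-- what changed: The follow-the-chain tail recursion (recompute the next row at each call, duplicated r>0 / wraparound branch bodies) is replaced by a closed-form rotation: the j-th visited row is (s-j) % n, so B scans j over range(n) once with direct modular indexing and no recursion.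
import Mathlib
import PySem

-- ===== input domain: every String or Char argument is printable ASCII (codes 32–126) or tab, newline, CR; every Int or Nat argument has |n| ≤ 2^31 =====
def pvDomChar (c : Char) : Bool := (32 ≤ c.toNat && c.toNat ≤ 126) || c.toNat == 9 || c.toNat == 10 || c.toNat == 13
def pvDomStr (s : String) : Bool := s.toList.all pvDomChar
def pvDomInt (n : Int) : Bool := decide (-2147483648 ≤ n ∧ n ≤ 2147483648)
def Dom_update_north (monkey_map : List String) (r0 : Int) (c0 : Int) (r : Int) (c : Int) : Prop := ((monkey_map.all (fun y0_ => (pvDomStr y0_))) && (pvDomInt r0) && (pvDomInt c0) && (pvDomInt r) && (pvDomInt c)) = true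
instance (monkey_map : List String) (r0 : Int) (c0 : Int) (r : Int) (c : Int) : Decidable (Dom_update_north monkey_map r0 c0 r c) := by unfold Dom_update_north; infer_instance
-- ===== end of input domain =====

-- B replaces A's follow-the-chain tail recursion by a closed-form rotation: the j-th
-- visited row is (s - j) % n, scanned once for j in range(n); same visiting order, no recursion.
-- Both ports totalise the partial Python behaviour with Option (A by fuel, B by falling
-- off the scan); Pre_ admits exactly the inputs on which the Python A returns.

-- ===== PORT A =====
def updateNorthRecA (fuel : Nat) (monkey_map : List String) (r0 : Int) (c0 : Int) (r : Int) (c : Int) : Option (Int × Int) :=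
  match fuel with
  | 0 => none
  | fuel + 1 =>
    if r > 0 then
      match PySem.List.pyGet? monkey_map (r - 1) with
      | none => none
      | some row =>
        match PySem.Str.pyGet? row c with
        | none => none
        | some ch =>
          if ch = '.' then some (r - 1, c)
          else if ch = '#' then some (r0, c0)
          else updateNorthRecA fuel monkey_map r0 c0 (r - 1) c
    else
      match PySem.List.pyGet? monkey_map ((monkey_map.length : Int) - 1) with
      | none => none
      | some row =>
        match PySem.Str.pyGet? row c with
        | none => none
        | some ch =>
          if ch = '.' then some ((monkey_map.length : Int) - 1, c)
          else if ch = '#' then some (r0, c0)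
          else updateNorthRecA fuel monkey_map r0 c0 ((monkey_map.length : Int) - 1) c

def update_north (monkey_map : List String) (r0 : Int) (c0 : Int) (r : Int) (c : Int) : Int × Int :=
  (updateNorthRecA (monkey_map.length + 1) monkey_map r0 c0 r c).getD (r0, c0)

-- ===== PORT B =====
-- the for-loop of Source B over the precomputed rotation list, with early return
def pvScanB (monkey_map : List String) (r0 : Int) (c0 : Int) (c : Int) : List Int → Option (Int × Int)
  | [] => none
  | nr :: rest =>
    match PySem.List.pyGet? monkey_map nr with
    | none => none
    | some row =>
      match PySem.Str.pyGet? row c with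
      | none => none
      | some ch =>
        if ch = '.' then some (nr, c)
        else if ch = '#' then some (r0, c0)
        else pvScanB monkey_map r0 c0 c rest

def update_north_alt (monkey_map : List String) (r0 : Int) (c0 : Int) (r : Int) (c : Int) : Int × Int :=
  let n : Int := (monkey_map.length : Int)
  let s : Int := if r > 0 then r - 1 else n - 1
  let rows : List Int := (PySem.List.pyRange 0 n 1).map (fun j => PySem.Int.mod (s - j) n)
  (pvScanB monkey_map r0 c0 c rows).getD (r0, c0)

-- ===== PRECONDITION & SPEC =====
-- helpers for Pre_: the first row of the northwards walk, the row index visited at step j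
-- (wraparound via mod), and the char seen there
def pvS (monkey_map : List String) (r : Int) : Int :=
  if r > 0 then r - 1 else (monkey_map.length : Int) - 1

def pvRowIdx (monkey_map : List String) (r : Int) (j : Nat) : Nat :=
  ((pvS monkey_map r - (j : Int)) % (monkey_map.length : Int)).toNat

def pvColChar (monkey_map : List String) (r : Int) (c : Int) (j : Nat) : Option Char :=
  PySem.Str.pyGet? (monkey_map.getD (pvRowIdx monkey_map r j) "") c

-- Pre_ = exactly the inputs on which the Python A returns: the map is nonempty, the first row
-- lookup is in range (r ≤ len; any r ≤ 0 wraps), and walking north with wraparound some step k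
-- hits a '.' or '#' with every column character up to step k in range (otherwise A raises
-- IndexError, or RecursionError on an all-blank column).
def Pre_update_north (monkey_map : List String) (r0 : Int) (c0 : Int) (r : Int) (c : Int) : Prop :=
  monkey_map ≠ [] ∧ r ≤ (monkey_map.length : Int) ∧
  ∃ k : Nat, k < monkey_map.length ∧
    (pvColChar monkey_map r c k = some '.' ∨ pvColChar monkey_map r c k = some '#') ∧
    ∀ j : Nat, j ≤ k → (pvColChar monkey_map r c j).isSome
instance (monkey_map : List String) (r0 : Int) (c0 : Int) (r : Int) (c : Int) : Decidable (Pre_update_north monkey_map r0 c0 r c) := by unfold Pre_update_north; infer_instance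

def pvWitness_update_north : List String × Int × Int × Int × Int := ([" #", ". ", "  "], 5, 7, 2, 0)

def Spec_update_north (monkey_map : List String) (r0 : Int) (c0 : Int) (r : Int) (c : Int) (out : Int × Int) : Prop := out = update_north_alt monkey_map r0 c0 r c
instance (monkey_map : List String) (r0 : Int) (c0 : Int) (r : Int) (c : Int) (out : Int × Int) : Decidable (Spec_update_north monkey_map r0 c0 r c out) := by unfold Spec_update_north; infer_instance

-- ===== CLAIM =====
def Claim_equal_update_north : Prop := ∀ (monkey_map : List String) (r0 : Int) (c0 : Int) (r : Int) (c : Int), Dom_update_north monkey_map r0 c0 r c → Pre_update_north monkey_map r0 c0 r c → Spec_update_north monkey_map r0 c0 r c (update_north monkey_map r0 c0 r c)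

-- ===== LEMMAS AND PROOFS =====

-- the sequence of rows A's recursion visits, as a list (fuel-many steps)
def pvVisit (monkey_map : List String) (r : Int) : Nat → List Int
  | 0 => []
  | n + 1 => pvS monkey_map r :: pvVisit monkey_map (pvS monkey_map r) n

-- A's recursion is the scan of its visit sequence
theorem recA_eq_scan_visit (fuel : Nat) (monkey_map : List String) (r0 c0 : Int) (r c : Int) :
    updateNorthRecA fuel monkey_map r0 c0 r c
      = pvScanB monkey_map r0 c0 c (pvVisit monkey_map r fuel) := by
  induction fuel generalizing r with
  | zero => rfl
  | succ n ih =>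
    by_cases h : r > 0 <;>
      simp only [updateNorthRecA, pvVisit, pvScanB, pvS, h, if_true, if_false, ih]

-- mod-shift identity: one step of the walk shifts the rotation by one
theorem pvS_shift (monkey_map : List String) (s : Int) (j : Int) (h0 : 0 ≤ s) :
    (pvS monkey_map s - j) % (monkey_map.length : Int) = (s - (j + 1)) % (monkey_map.length : Int) := by
  unfold pvS
  by_cases h : s > 0
  · simp only [h, if_true]; ring_nf
  · have hs : s = 0 := by omega
    subst hs
    rw [if_neg h, show (monkey_map.length : Int) - 1 - j = (0 - (j + 1)) + (monkey_map.length : Int) * 1 by ring,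
      Int.add_mul_emod_self_left]

-- the visit sequence is the closed-form rotation
theorem visit_eq (monkey_map : List String) (hL : monkey_map ≠ []) :
    ∀ (n : Nat) (r : Int), 0 ≤ pvS monkey_map r → pvS monkey_map r < (monkey_map.length : Int) →
      pvVisit monkey_map r n
        = (List.range n).map (fun j : Nat => (pvS monkey_map r - (j : Int)) % (monkey_map.length : Int)) := by
  intro n
  induction n with
  | zero => intro r _ _; rfl
  | succ n ih =>
    intro r h0 h1
    have hlen : 1 ≤ (monkey_map.length : Int) := by
      have := List.length_pos_iff.mpr hL; exact_mod_cast this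
    have hs' : 0 ≤ pvS monkey_map (pvS monkey_map r) ∧
        pvS monkey_map (pvS monkey_map r) < (monkey_map.length : Int) := by
      unfold pvS at h0 h1 ⊢
      constructor <;> (split_ifs at * <;> omega)
    rw [List.range_succ_eq_map, List.map_cons, List.map_map]
    show pvS monkey_map r :: pvVisit monkey_map (pvS monkey_map r) n = _ :: _
    congr 1
    · rw [show ((0 : Nat) : Int) = 0 by norm_num, sub_zero, Int.emod_eq_of_lt h0 h1]
    · rw [ih (pvS monkey_map r) hs'.1 hs'.2]
      apply List.map_congr_left
      intro j _
      simp only [Function.comp]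
      rw [show ((j + 1 : Nat) : Int) = (j : Int) + 1 by push_cast; ring]
      exact pvS_shift monkey_map (pvS monkey_map r) (j : Int) h0

-- a scan that succeeds on a prefix succeeds unchanged on any extension
theorem scan_prefix_some (monkey_map : List String) (r0 c0 c : Int) (v : Int × Int) :
    ∀ (l1 l2 : List Int), pvScanB monkey_map r0 c0 c l1 = some v →
      pvScanB monkey_map r0 c0 c (l1 ++ l2) = some v := by
  intro l1
  induction l1 with
  | nil => intro l2 h; exact absurd h (by simp [pvScanB])
  | cons nr rest ih =>
    intro l2 h
    cases hg : PySem.List.pyGet? monkey_map nr with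
    | none => rw [pvScanB] at h; simp only [hg] at h; exact absurd h (by simp)
    | some row =>
      cases hc : PySem.Str.pyGet? row c with
      | none => rw [pvScanB] at h; simp only [hg, hc] at h; exact absurd h (by simp)
      | some ch =>
        simp only [pvScanB, List.cons_append, hg, hc] at h ⊢
        split_ifs at h ⊢ <;> first | exact h | exact ih l2 h

-- starting-row bounds are preserved along the walk
theorem pvS_bounds (monkey_map : List String) (s : Int) (h0 : 0 ≤ s)
    (h1 : s < (monkey_map.length : Int)) :
    0 ≤ pvS monkey_map s ∧ pvS monkey_map s < (monkey_map.length : Int) := by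
  unfold pvS; constructor <;> (split_ifs <;> omega)

-- one step of the walk shifts the column-character sequence by one
theorem colChar_shift (monkey_map : List String) (r c : Int) (j : Nat) (h0 : 0 ≤ pvS monkey_map r) :
    pvColChar monkey_map (pvS monkey_map r) c j = pvColChar monkey_map r c (j + 1) := by
  unfold pvColChar pvRowIdx
  rw [show ((j + 1 : Nat) : Int) = (j : Int) + 1 by push_cast; ring, pvS_shift monkey_map (pvS monkey_map r) (j : Int) h0]

-- the char the scan sees at the head of the rotation is pvColChar at step 0
theorem colChar_zero (monkey_map : List String) (r c : Int) (h0 : 0 ≤ pvS monkey_map r)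
    (h1 : pvS monkey_map r < (monkey_map.length : Int)) :
    pvColChar monkey_map r c 0
      = PySem.Str.pyGet? (monkey_map.getD (pvS monkey_map r).toNat "") c := by
  unfold pvColChar pvRowIdx
  rw [show ((0 : Nat) : Int) = 0 by norm_num, sub_zero, Int.emod_eq_of_lt h0 h1]


-- one step of the scan of the rotation: look at the head row, else recurse on the shifted rotation
theorem scan_rot_cons (monkey_map : List String) (r0 c0 c : Int) (r : Int) (k : Nat)
    (h0 : 0 ≤ pvS monkey_map r) (h1 : pvS monkey_map r < (monkey_map.length : Int)) :
    pvScanB monkey_map r0 c0 c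
        ((List.range (k + 1)).map (fun j : Nat => (pvS monkey_map r - (j : Int)) % (monkey_map.length : Int)))
      = match pvColChar monkey_map r c 0 with
        | none => none
        | some ch =>
          if ch = '.' then some (pvS monkey_map r, c)
          else if ch = '#' then some (r0, c0)
          else pvScanB monkey_map r0 c0 c
              ((List.range k).map (fun j : Nat => (pvS monkey_map (pvS monkey_map r) - (j : Int)) % (monkey_map.length : Int))) := by
  have hn : (pvS monkey_map r).toNat < monkey_map.length := by omega
  have hrow : PySem.List.pyGet? monkey_map (pvS monkey_map r)
      = some (monkey_map.getD (pvS monkey_map r).toNat "") := by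
    rw [PySem.List.pyGet?_eq_some_getElem monkey_map h0 h1, List.getD_eq_getElem _ _ hn]
  have hhead : (pvS monkey_map r - ((0 : Nat) : Int)) % (monkey_map.length : Int) = pvS monkey_map r := by
    rw [show ((0 : Nat) : Int) = 0 by norm_num, sub_zero, Int.emod_eq_of_lt h0 h1]
  have htail : (List.range k).map ((fun j : Nat => (pvS monkey_map r - (j : Int)) % (monkey_map.length : Int)) ∘ Nat.succ)
      = (List.range k).map (fun j : Nat => (pvS monkey_map (pvS monkey_map r) - (j : Int)) % (monkey_map.length : Int)) := by
    apply List.map_congr_left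
    intro j _
    simp only [Function.comp]
    rw [show ((j.succ : Nat) : Int) = (j : Int) + 1 by push_cast; ring]
    exact (pvS_shift monkey_map (pvS monkey_map r) (j : Int) h0).symm
  rw [List.range_succ_eq_map, List.map_cons, List.map_map, hhead, htail, pvScanB]
  simp only [hrow]
  rw [colChar_zero monkey_map r c h0 h1]

-- under Pre_'s hit condition, the scan of the first k+1 rotation steps succeeds
theorem scan_hit (monkey_map : List String) (r0 c0 c : Int) (hL : monkey_map ≠ []) :
    ∀ (k : Nat) (r : Int), 0 ≤ pvS monkey_map r → pvS monkey_map r < (monkey_map.length : Int) →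
      (∀ j : Nat, j ≤ k → (pvColChar monkey_map r c j).isSome) →
      (pvColChar monkey_map r c k = some '.' ∨ pvColChar monkey_map r c k = some '#') →
      ∃ v, pvScanB monkey_map r0 c0 c
          ((List.range (k + 1)).map (fun j : Nat => (pvS monkey_map r - (j : Int)) % (monkey_map.length : Int))) = some v := by
  intro k
  induction k with
  | zero =>
    intro r h0 h1 _ hhit
    rw [scan_rot_cons monkey_map r0 c0 c r 0 h0 h1]
    rcases hhit with h | h <;> rw [h]
    · exact ⟨(pvS monkey_map r, c), by simp⟩
    · exact ⟨(r0, c0), by simp⟩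
  | succ k ih =>
    intro r h0 h1 hsome hhit
    rw [scan_rot_cons monkey_map r0 c0 c r (k + 1) h0 h1]
    cases hch : pvColChar monkey_map r c 0 with
    | none => exact absurd (hsome 0 (by omega)) (by simp [hch])
    | some ch =>
      by_cases hdot : ch = '.'
      · exact ⟨(pvS monkey_map r, c), by simp [hdot]⟩
      by_cases hhash : ch = '#'
      · exact ⟨(r0, c0), by simp [hhash]⟩
      obtain ⟨hs0, hs1⟩ := pvS_bounds monkey_map (pvS monkey_map r) h0 h1
      obtain ⟨v, hv⟩ := ih (pvS monkey_map r) hs0 hs1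
        (fun j hj => by rw [colChar_shift monkey_map r c j h0]; exact hsome (j + 1) (by omega))
        (by rw [colChar_shift monkey_map r c k h0]; exact hhit)
      exact ⟨v, by simp only [hdot, hhash, if_false]; exact hv⟩

-- main equivalence
theorem update_north_spec : Claim_equal_update_north := by
  intro monkey_map r0 c0 r c _ hpre
  obtain ⟨hne, hr, k, hk, hhit, hsome⟩ := hpre
  have hlen : 1 ≤ (monkey_map.length : Int) := by
    have := List.length_pos_iff.mpr hne; exact_mod_cast this
  have h0 : 0 ≤ pvS monkey_map r := by unfold pvS; split_ifs <;> omega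
  have h1 : pvS monkey_map r < (monkey_map.length : Int) := by unfold pvS; split_ifs <;> omega
  obtain ⟨v, hv⟩ := scan_hit monkey_map r0 c0 c hne k r h0 h1 hsome hhit
  have hsplit : ∀ n : Nat, k + 1 ≤ n →
      pvScanB monkey_map r0 c0 c
        ((List.range n).map (fun j : Nat => (pvS monkey_map r - (j : Int)) % (monkey_map.length : Int))) = some v := by
    intro n hn
    rw [show n = (k + 1) + (n - (k + 1)) by omega, List.range_add, List.map_append]
    exact scan_prefix_some monkey_map r0 c0 c v _ _ hv
  have hA : update_north monkey_map r0 c0 r c = v := by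
    unfold update_north
    rw [recA_eq_scan_visit, visit_eq monkey_map hne _ r h0 h1, hsplit _ (by omega)]
    rfl
  have hB : update_north_alt monkey_map r0 c0 r c = v := by
    simp only [update_north_alt]
    rw [PySem.List.pyRange_one]
    simp only [sub_zero, Int.toNat_natCast, List.map_map]
    have hfun : ∀ j ∈ List.range monkey_map.length,
        ((fun j : Int => PySem.Int.mod ((if r > 0 then r - 1 else (monkey_map.length : Int) - 1) - j) (monkey_map.length : Int)) ∘ (fun j : Nat => (0 : Int) + (j : Int))) j
          = (fun j : Nat => (pvS monkey_map r - (j : Int)) % (monkey_map.length : Int)) j := by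
      intro j _
      simp only [Function.comp, zero_add]
      rw [PySem.Int.mod_eq_emod_of_pos (by omega)]
      rfl
    rw [List.map_congr_left hfun, hsplit monkey_map.length (by omega)]
    rfl
  unfold Spec_update_north
  rw [hA, hB]
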